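-- pv_equiv track=rewrite | github.com/Hap-Hugh/PARQO | parse.py | parse_string
-- ===== SOURCE A (Python) =====
-- def split_string(tmp, d):
--     tmp = tmp.split(d)
--     tmp_list = []
--     for k in range(len(tmp)):
--         tmp_list.append(tmp[k])
--         if k < len(tmp) - 1:
--             tmp_list.append(d)
--     return tmp_list
--
-- def parse_string(new_list, d):
--     final_list = []
--     for i in range(len(new_list)):
--         if d in new_list[i]:
--             tmp_list = split_string(new_list[i], d)
--             final_list += tmp_list
--         else:
--             final_list.append(new_list[i])
--     return final_list
-- ===== SOURCE B (Python) =====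
-- def parse_string(new_list, d):
--     final_list = []
--     for s in new_list:
--         cur = ""
--         i = 0
--         while i < len(s):
--             if d and s.startswith(d, i):
--                 final_list.append(cur)
--                 final_list.append(d)
--                 cur = ""
--                 i += len(d)
--             else:
--                 cur += s[i]
--                 i += 1
--         final_list.append(cur)
--     return final_list
-- ===== Notes on version B (the rewrite author's own statement) =====
-- stated objective: alternative
-- what changed: B never calls str.split: it is a single character-level state machine that scans each string left to right, testing s.startswith(d, i) at each position, emitting the accumulated piece and the delimiter on a match and skipping len(d) characters; A instead splits each string with str.split and re-interleaves the delimiter in an index loop.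
import Mathlib
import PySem

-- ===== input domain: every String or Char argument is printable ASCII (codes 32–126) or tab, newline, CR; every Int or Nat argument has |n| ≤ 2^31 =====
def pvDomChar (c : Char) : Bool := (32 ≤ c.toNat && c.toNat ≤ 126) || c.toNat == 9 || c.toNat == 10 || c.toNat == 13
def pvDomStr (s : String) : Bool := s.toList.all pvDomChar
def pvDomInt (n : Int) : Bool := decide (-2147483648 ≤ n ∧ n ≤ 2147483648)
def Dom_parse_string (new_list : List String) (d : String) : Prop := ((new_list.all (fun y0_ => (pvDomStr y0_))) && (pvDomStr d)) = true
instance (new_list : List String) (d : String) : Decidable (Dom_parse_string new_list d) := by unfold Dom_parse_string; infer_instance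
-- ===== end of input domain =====

-- B replaces str.split + re-interleaving by a character-level scan that matches the
-- delimiter in place and emits pieces as it goes — an alternative algorithm, same cost.


-- ===== PORT A =====
-- split?.getD [] is only a totality default: under Pre_ split_string is only reached with d ≠ ""
def split_string (tmp : String) (d : String) : List String :=
  let t := (PySem.Str.split? tmp d).getD []
  (PySem.List.pyRange 0 (PySem.List.len t)).foldl
    (fun acc k =>
      let acc := acc ++ [PySem.List.pyGetD t k ""]
      if k < PySem.List.len t - 1 then acc ++ [d] else acc) []

def parse_string (new_list : List String) (d : String) : List String :=
  (PySem.List.pyRange 0 (PySem.List.len new_list)).foldl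
    (fun acc i =>
      let s := PySem.List.pyGetD new_list i ""
      if PySem.Str.isIn d s then acc ++ split_string s d else acc ++ [s]) []

-- ===== PORT B =====
-- B's while loop over the index i, as structural recursion over the remaining suffix of
-- the string; `if d and s.startswith(d, i)` is the isPrefixOf test on that suffix.
def scanB (d : String) (l : List Char) (cur : List Char) (out : List String) : List String :=
  match l with
  | [] => out ++ [String.ofList cur]
  | c :: rest =>
    if h : d.toList ≠ [] ∧ d.toList.isPrefixOf (c :: rest) then
      scanB d ((c :: rest).drop d.toList.length) [] (out ++ [String.ofList cur, d])
    else
      scanB d rest (cur ++ [c]) out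
termination_by l.length
decreasing_by
  · have : d.toList.length ≠ 0 := fun h0 => h.1 (List.length_eq_zero_iff.mp h0)
    simp only [List.length_drop, List.length_cons]
    omega
  · simp

def parse_string_alt (new_list : List String) (d : String) : List String :=
  new_list.foldl (fun out s => scanB d s.toList [] out) []

-- ===== PRECONDITION & SPEC =====
-- Pre_ excludes exactly the inputs on which A raises: d = "" with a nonempty list makes
-- str.split("") raise ValueError (since "" in s is always true).
def Pre_parse_string (new_list : List String) (d : String) : Prop := d ≠ "" ∨ new_list = []
instance (new_list : List String) (d : String) : Decidable (Pre_parse_string new_list d) := by unfold Pre_parse_string; infer_instance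
def pvWitness_parse_string : List String × String := (["a-b", "c"], "-")

def Spec_parse_string (new_list : List String) (d : String) (out : List String) : Prop := out = parse_string_alt new_list d
instance (new_list : List String) (d : String) (out : List String) : Decidable (Spec_parse_string new_list d out) := by unfold Spec_parse_string; infer_instance

-- ===== CLAIM (what is proved, stated in full; the proofs are below) =====
def Claim_equal_parse_string : Prop := ∀ (new_list : List String) (d : String), Dom_parse_string new_list d → Pre_parse_string new_list d → Spec_parse_string new_list d (parse_string new_list d)

-- ===== LEMMAS AND PROOFS =====

-- the interleaved-pair flatten both programs reduce to, per element
def interleave (d : String) (t : List String) : List String := t.flatMap (fun p => [p, d])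

-- splitOn never returns the empty list
lemma splitOn_go_ne_nil (sep : List Char) (fuel : Nat) (l cur : List Char)
    (acc : List (List Char)) : PySem.Chars.splitOn.go sep fuel l cur acc ≠ [] := by
  induction fuel generalizing l cur acc with
  | zero => simp [PySem.Chars.splitOn.go]
  | succ fuel ih =>
    cases l with
    | nil => simp [PySem.Chars.splitOn.go]
    | cons c rest =>
      rw [PySem.Chars.splitOn.go]
      split
      · exact ih _ _ _
      · exact ih _ _ _

-- go's accumulator peels off as a reversed prefix
lemma splitOn_go_acc (sep : List Char) (fuel : Nat) (l cur : List Char)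
    (acc : List (List Char)) :
    PySem.Chars.splitOn.go sep fuel l cur acc
      = acc.reverse ++ PySem.Chars.splitOn.go sep fuel l cur [] := by
  induction fuel generalizing l cur acc with
  | zero => simp [PySem.Chars.splitOn.go]
  | succ fuel ih =>
    cases l with
    | nil => simp [PySem.Chars.splitOn.go]
    | cons c rest =>
      rw [PySem.Chars.splitOn.go, PySem.Chars.splitOn.go]
      split
      · rw [ih _ _ (cur.reverse :: acc), ih _ _ [cur.reverse]]
        simp
      · exact ih _ _ _

-- the pieces list A splits into, under d ≠ ""
def pieces (s d : String) : List String := (PySem.Str.split? s d).getD []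

lemma pieces_eq (s d : String) (hd : d ≠ "") :
    pieces s d = (PySem.Chars.splitOn s.toList d.toList).map String.ofList := by
  have : d.toList.isEmpty = false := by
    rw [List.isEmpty_eq_false_iff]
    intro h0
    exact hd (String.toList_eq_nil_iff.mp h0)
  simp [pieces, PySem.Str.split?, PySem.Chars.split?, this]

lemma splitOn_ne_nil (s sep : List Char) : PySem.Chars.splitOn s sep ≠ [] := by
  unfold PySem.Chars.splitOn; exact splitOn_go_ne_nil _ _ _ _ _

lemma pieces_ne_nil (s d : String) (hd : d ≠ "") : pieces s d ≠ [] := by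
  rw [pieces_eq s d hd]
  simp [splitOn_ne_nil]

-- B's scan computes, per string, the delimiter-interleaved splitOn pieces minus the
-- trailing delimiter — the key invariant linking the state machine to str.split
lemma scanB_eq_go (d : String) (hd : d.toList ≠ []) (fuel : Nat) :
    ∀ (l cur : List Char) (out : List String), l.length < fuel →
    scanB d l cur out
      = out ++ (interleave d ((PySem.Chars.splitOn.go d.toList fuel l cur.reverse []).map
          String.ofList)).dropLast := by
  induction fuel with
  | zero => intro l cur out h; omega
  | succ fuel ih =>
    intro l cur out h
    cases l with
    | nil =>
      rw [scanB, PySem.Chars.splitOn.go]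
      · simp [interleave]
      · omega
    | cons c rest =>
      rw [scanB, PySem.Chars.splitOn.go]
      by_cases hp : d.toList.isPrefixOf (c :: rest) = true
      · rw [dif_pos ⟨hd, hp⟩, if_pos hp]
        have hlt : ((c :: rest).drop d.toList.length).length < fuel := by
          have : d.toList.length ≠ 0 := fun h0 => hd (List.length_eq_zero_iff.mp h0)
          simp only [List.length_drop, List.length_cons]
          simp only [List.length_cons] at h
          omega
        rw [ih _ [] _ hlt]
        simp only [List.reverse_nil, List.reverse_reverse]
        rw [splitOn_go_acc d.toList fuel ((c :: rest).drop d.toList.length) [] [cur]]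
        have hne : PySem.Chars.splitOn.go d.toList fuel ((c :: rest).drop d.toList.length) [] [] ≠ [] :=
          splitOn_go_ne_nil _ _ _ _ _
        rcases List.exists_cons_of_ne_nil hne with ⟨p, ps, hps⟩
        rw [hps]
        simp [interleave, List.flatMap]
      · rw [dif_neg (by simp [hp]), if_neg hp]
        have hlt : rest.length < fuel := by
          simp only [List.length_cons] at h; omega
        rw [ih rest (cur ++ [c]) out hlt]
        simp

lemma scanB_elem (s d : String) (hd : d ≠ "") (out : List String) :
    scanB d s.toList [] out = out ++ (interleave d (pieces s d)).dropLast := by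
  rw [scanB_eq_go d (fun h0 => hd (String.toList_eq_nil_iff.mp h0))
      (s.toList.length + 1) s.toList [] out (by omega)]
  rw [pieces_eq s d hd]
  rfl

-- if sep never occurs in l, the go loop just copies l into cur
lemma splitOn_go_of_not_infix (sep : List Char) (fuel : Nat) (l cur : List Char)
    (acc : List (List Char)) (h : ¬ sep <:+: l) :
    PySem.Chars.splitOn.go sep fuel l cur acc = ((cur.reverse ++ l) :: acc).reverse := by
  induction fuel generalizing l cur with
  | zero => simp [PySem.Chars.splitOn.go]
  | succ fuel ih =>
    cases l with
    | nil => simp [PySem.Chars.splitOn.go]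
    | cons c rest =>
      rw [PySem.Chars.splitOn.go]
      have hpre : sep.isPrefixOf (c :: rest) = false := by
        rw [Bool.eq_false_iff]
        intro ht
        exact h (List.isPrefixOf_iff_prefix.mp ht).isInfix
      rw [hpre]
      simp only [Bool.false_eq_true, if_false]
      rw [ih rest (c :: cur) (fun hin => h (List.infix_cons hin))]
      simp

lemma splitOn_of_not_infix (s sep : List Char) (h : ¬ sep <:+: s) :
    PySem.Chars.splitOn s sep = [s] := by
  unfold PySem.Chars.splitOn
  rw [splitOn_go_of_not_infix sep _ s [] [] h]
  simp

lemma pieces_of_not_isIn (s d : String) (hd : d ≠ "") (h : PySem.Str.isIn d s = false) :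
    pieces s d = [s] := by
  rw [pieces_eq s d hd, splitOn_of_not_infix]
  · simp
  · have := PySem.Chars.isIn_eq_false_iff (sub := d.toList) (s := s.toList)
    exact this.mp (by simpa using h)

-- an append-of-pairs fold flattens to interleave
lemma foldl_pairs (d : String) (t : List String) (acc : List String) :
    t.foldl (fun o p => (o ++ [p]) ++ [d]) acc = acc ++ interleave d t := by
  induction t generalizing acc with
  | nil => simp [interleave]
  | cons p t _ => simp [interleave, List.flatMap]

-- A's split_string is the flatten minus the trailing delimiter
lemma split_string_eq (s d : String) (hd : d ≠ "") :
    split_string s d = (interleave d (pieces s d)).dropLast := by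
  dsimp only [split_string]
  rw [show (PySem.Str.split? s d).getD [] = pieces s d from rfl]
  rcases List.eq_nil_or_concat (pieces s d) with h | ⟨u, x, h⟩
  · exact absurd h (pieces_ne_nil s d hd)
  · rw [List.concat_eq_append] at h
    rw [h]
    have hlen : PySem.List.len (u ++ [x]) = (u.length : Int) + 1 := by
      simp [PySem.List.len_eq]
    rw [hlen, PySem.List.pyRange_one_append 0 u.length ((u.length : Int) + 1) (by positivity) (by omega)]
    rw [List.foldl_append]
    rw [PySem.List.foldl_congr_mem _ _
      (fun acc k => (acc ++ [PySem.List.pyGetD (u ++ [x]) k ""]) ++ [d]) []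
      (by
        intro acc k hk
        rw [PySem.List.mem_pyRange_one] at hk
        simp only
        rw [if_pos (by omega)])]
    have hseg : (PySem.List.pyRange 0 (u.length : Int)).foldl
        (fun acc k => (acc ++ [PySem.List.pyGetD (u ++ [x]) k ""]) ++ [d]) []
        = interleave d u := by
      rw [PySem.List.foldl_congr_mem _ _
        (fun acc k => (acc ++ [PySem.List.pyGetD u k ""]) ++ [d]) []
        (by
          intro acc k hk
          rw [PySem.List.mem_pyRange_one] at hk
          have h1 : PySem.List.pyGetD (u ++ [x]) k "" = PySem.List.pyGetD u k "" := by
            rw [PySem.List.pyGetD_eq_getElem (u ++ [x]) "" (by omega) (by simp; omega),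
                PySem.List.pyGetD_eq_getElem u "" (by omega) (by exact_mod_cast hk.2)]
            rw [List.getElem_append_left]
          rw [h1])]
      rw [show PySem.List.pyRange 0 (u.length : Int)
            = PySem.List.pyRange 0 (PySem.List.len u) by simp [PySem.List.len_eq]]
      rw [show (0 : Int) = ((0 : Nat) : Int) by simp,
          PySem.List.foldl_pyRange_pyGetD u "" (fun acc p => (acc ++ [p]) ++ [d]) [] (by simp)]
      simpa using foldl_pairs d u []
    rw [hseg]
    rw [PySem.List.pyRange_one_cons (by omega),
        show ((u.length : Int) + 1) = ((u.length : Int)) + 1 from rfl]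
    have : PySem.List.pyRange ((u.length : Int) + 1) ((u.length : Int) + 1) = [] := by
      simp [pysem]
    rw [this]
    simp only [List.foldl_cons, List.foldl_nil]
    rw [if_neg (by omega)]
    have hx : PySem.List.pyGetD (u ++ [x]) ((u.length : Int)) "" = x := by
      simp
    rw [hx]
    have : interleave d (u ++ [x]) = interleave d u ++ [x, d] := by
      simp [interleave, List.flatMap]
    rw [this]
    rw [List.dropLast_append]
    simp

-- per element, A's contribution equals B's contribution
lemma elem_eq (s d : String) (hd : d ≠ "") :
    (if PySem.Str.isIn d s then split_string s d else [s])
      = (interleave d (pieces s d)).dropLast := by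
  by_cases h : PySem.Str.isIn d s = true
  · rw [if_pos h, split_string_eq s d hd]
  · rw [if_neg h, pieces_of_not_isIn s d hd (Bool.eq_false_iff.mpr h)]
    simp [interleave, List.flatMap]

-- B's fold flattens to the per-element contributions
lemma alt_fold_eq (d : String) (hd : d ≠ "") (ls : List String) (out : List String) :
    ls.foldl (fun out s => scanB d s.toList [] out) out
    = out ++ ls.flatMap (fun s => (interleave d (pieces s d)).dropLast) := by
  induction ls generalizing out with
  | nil => simp
  | cons s ls ih =>
    simp only [List.foldl_cons]
    rw [scanB_elem s d hd, ih]
    simp [List.flatMap]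

-- ===== VERDICT (by name: the statement is the Claim_ definition above) =====
theorem parse_string_spec : Claim_equal_parse_string := by
  intro new_list d _ hpre
  unfold Spec_parse_string
  rcases hpre with hd | hnil
  · dsimp only [parse_string, parse_string_alt]
    rw [show (0 : Int) = ((0 : Nat) : Int) by simp,
        PySem.List.foldl_pyRange_pyGetD new_list ""
          (fun acc s => if PySem.Str.isIn d s then acc ++ split_string s d else acc ++ [s]) [] (by simp)]
    rw [alt_fold_eq d hd new_list []]
    rw [PySem.List.foldl_congr_mem _ _
      (fun acc s => acc ++ (interleave d (pieces s d)).dropLast) []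
      (by
        intro acc s _
        simp only
        rw [show (if PySem.Str.isIn d s = true then acc ++ split_string s d else acc ++ [s])
              = acc ++ (if PySem.Str.isIn d s = true then split_string s d else [s]) by
            split <;> rfl]
        rw [elem_eq s d hd])]
    rw [PySem.List.foldl_append_eq_flatMap]
    simp
  · subst hnil; rfl
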